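-- pv_equiv track=rewrite | github.com/Lmraza98/hello | services/web_automation/browser/workflows/builder.py | infer_search_input_hint
-- ===== SOURCE A (Python) =====
-- from typing import Any
--
-- def _clean_text(value: Any) -> str:
--     return " ".join(str(value or "").split()).strip()
--
-- def _contains_search_token(value: str) -> bool:
--     lowered = value.lower()
--     return any(tok in lowered for tok in ("search", "find", "query", "keyword"))
--
-- def infer_search_input_hint(refs: list[dict[str, Any]]) -> tuple[str, str]:
--     for row in refs:
--         if not isinstance(row, dict):
--             continue
--         role = _clean_text(row.get("role")).lower()
--         label = _clean_text(row.get("label"))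
--         if role in {"input", "textbox", "searchbox", "combobox"} and _contains_search_token(label):
--             return role or "input", label or "search"
--
--     for row in refs:
--         if not isinstance(row, dict):
--             continue
--         role = _clean_text(row.get("role")).lower()
--         label = _clean_text(row.get("label"))
--         if role in {"input", "textbox", "searchbox", "combobox"}:
--             return role or "input", (label or "search")
--     return "input", "search"
-- ===== SOURCE B (Python) =====
-- from typing import Any
--
-- def _clean_text(value: Any) -> str:
--     return " ".join(str(value or "").split()).strip()
--
-- def _contains_search_token(value: str) -> bool:
--     lowered = value.lower()
--     return any(tok in lowered for tok in ("search", "find", "query", "keyword"))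
--
-- def infer_search_input_hint(refs: list) -> tuple:
--     fallback = None
--     for row in refs:
--         if not isinstance(row, dict):
--             continue
--         role = _clean_text(row.get("role")).lower()
--         if role not in {"input", "textbox", "searchbox", "combobox"}:
--             continue
--         label = _clean_text(row.get("label"))
--         if _contains_search_token(label):
--             return role or "input", label or "search"
--         if fallback is None:
--             fallback = (role, label)
--     if fallback is not None:
--         role, label = fallback
--         return role or "input", label or "search"
--     return "input", "search"
-- ===== Notes on version B (the rewrite author's own statement) =====
-- stated objective: simpler
-- what changed: Replaced A's two full passes over refs (priority pass, then fallback pass recomputing role/label) with a single pass that returns immediately on a priority match and records the first valid-role row as a fallback.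
import Mathlib
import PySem

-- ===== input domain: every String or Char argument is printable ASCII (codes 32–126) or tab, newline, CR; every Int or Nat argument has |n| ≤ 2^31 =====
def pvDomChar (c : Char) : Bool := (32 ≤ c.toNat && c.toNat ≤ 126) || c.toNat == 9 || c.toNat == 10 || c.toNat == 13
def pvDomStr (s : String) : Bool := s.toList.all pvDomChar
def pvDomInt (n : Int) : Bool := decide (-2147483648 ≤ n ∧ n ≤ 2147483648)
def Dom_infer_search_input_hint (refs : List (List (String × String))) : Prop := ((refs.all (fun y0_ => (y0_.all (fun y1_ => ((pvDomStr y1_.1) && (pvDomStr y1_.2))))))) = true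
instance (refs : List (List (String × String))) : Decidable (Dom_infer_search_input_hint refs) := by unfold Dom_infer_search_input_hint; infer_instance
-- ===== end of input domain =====

-- B replaces A's two passes over refs with a single pass that records the first valid-role row
-- as a fallback (objective: simpler). Return values only; neither program mutates its argument.

-- ===== PORT A =====
-- _clean_text(value): " ".join(str(value or "").split()).strip(); value is row.get(key), None → ""
def pvClean (v : Option String) : String :=
  PySem.Str.strip (PySem.Str.join " " (PySem.Str.split₀ (v.getD "")))

-- _contains_search_token: any(tok in value.lower() for tok in ("search","find","query","keyword"))
def pvHasTok (s : String) : Bool :=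
  let lowered := PySem.Str.lower s
  PySem.Str.isIn "search" lowered || PySem.Str.isIn "find" lowered ||
  PySem.Str.isIn "query" lowered || PySem.Str.isIn "keyword" lowered

-- role in {"input", "textbox", "searchbox", "combobox"}
def pvValidRole (r : String) : Bool :=
  r == "input" || r == "textbox" || r == "searchbox" || r == "combobox"

-- Python's `s or d` for strings (non-empty string is truthy)
def pvOr (s d : String) : String := if s == "" then d else s

-- first loop of A (early return as Option); rows are dicts by the type convention
def pvPass1 : List (List (String × String)) → Option (String × String)
  | [] => none
  | row :: rest =>
    let role := PySem.Str.lower (pvClean ((PySem.Dict.mk row).get? "role"))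
    let label := pvClean ((PySem.Dict.mk row).get? "label")
    if pvValidRole role && pvHasTok label then some (pvOr role "input", pvOr label "search")
    else pvPass1 rest

-- second loop of A
def pvPass2 : List (List (String × String)) → Option (String × String)
  | [] => none
  | row :: rest =>
    let role := PySem.Str.lower (pvClean ((PySem.Dict.mk row).get? "role"))
    let label := pvClean ((PySem.Dict.mk row).get? "label")
    if pvValidRole role then some (pvOr role "input", pvOr label "search")
    else pvPass2 rest

def infer_search_input_hint (refs : List (List (String × String))) : String × String :=
  match pvPass1 refs with
  | some p => p
  | none =>
    match pvPass2 refs with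
    | some p => p
    | none => ("input", "search")

-- ===== PORT B =====
-- single loop with a `fallback` accumulator (None until the first valid-role row)
def pvLoopB : List (List (String × String)) → Option (String × String) → String × String
  | [], fb =>
    match fb with
    | some (role, label) => (pvOr role "input", pvOr label "search")
    | none => ("input", "search")
  | row :: rest, fb =>
    let role := PySem.Str.lower (pvClean ((PySem.Dict.mk row).get? "role"))
    if pvValidRole role then
      let label := pvClean ((PySem.Dict.mk row).get? "label")
      if pvHasTok label then (pvOr role "input", pvOr label "search")
      else pvLoopB rest (match fb with | none => some (role, label) | some p => some p)
    else pvLoopB rest fb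

def infer_search_input_hint_alt (refs : List (List (String × String))) : String × String :=
  pvLoopB refs none

-- ===== PRECONDITION & SPEC =====
def Spec_infer_search_input_hint (refs : List (List (String × String))) (out : String × String) : Prop := out = infer_search_input_hint_alt refs
instance (refs : List (List (String × String))) (out : String × String) : Decidable (Spec_infer_search_input_hint refs out) := by unfold Spec_infer_search_input_hint; infer_instance

-- ===== CLAIM (what is proved, stated in full; the proofs are below) =====
def Claim_equal_infer_search_input_hint : Prop := ∀ (refs : List (List (String × String))), Dom_infer_search_input_hint refs → Spec_infer_search_input_hint refs (infer_search_input_hint refs)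

-- ===== LEMMAS AND PROOFS =====

-- B's loop, for any fallback state, equals: A's first pass; else the formatted fallback; else A's second pass.
theorem pvLoopB_eq (refs : List (List (String × String))) (fb : Option (String × String)) :
    pvLoopB refs fb =
      match pvPass1 refs with
      | some p => p
      | none =>
        match fb with
        | some (role, label) => (pvOr role "input", pvOr label "search")
        | none =>
          match pvPass2 refs with
          | some p => p
          | none => ("input", "search") := by
  induction refs generalizing fb with
  | nil => cases fb <;> rfl
  | cons row rest ih =>
    simp only [pvLoopB, pvPass1, pvPass2]
    by_cases hv : pvValidRole (PySem.Str.lower (pvClean ((PySem.Dict.mk row).get? "role"))) = true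
    · by_cases ht : pvHasTok (pvClean ((PySem.Dict.mk row).get? "label")) = true
      · simp [hv, ht]
      · cases fb with
        | none => simp [hv, ht, ih]
        | some p => cases p; simp [hv, ht, ih]
    · simp only [Bool.not_eq_true] at hv
      simp [hv, ih]

-- ===== VERDICT (by name: the statement is the Claim_ definition above) =====
theorem infer_search_input_hint_spec : Claim_equal_infer_search_input_hint := by
  intro refs _
  show infer_search_input_hint refs = infer_search_input_hint_alt refs
  rw [infer_search_input_hint_alt, pvLoopB_eq, infer_search_input_hint]
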